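-- pv_equiv track=rewrite | github.com/mattblferrer/competitive-programming | 51-100/068.py | ring_string
-- ===== SOURCE A (Python) =====
-- def ring_string(inner_ring, outer_ring):
--     string = ""
--
--     # start from numerically lowest external (outer) node, go clockwise
--     while outer_ring[0] != min(outer_ring):
--         # rotate both rings
--         outer_ring.append(outer_ring.pop(0))
--         inner_ring.append(inner_ring.pop(0))
--
--     # add each "line" to final string
--     for i in range(5):
--         string += str(outer_ring[i]) + str(inner_ring[i]) + str(inner_ring[(i+1) % 5])
--
--     return string
-- ===== SOURCE B (Python) =====
-- def ring_string(inner_ring, outer_ring):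
--     # Rotate once by the index of the minimum instead of repeatedly
--     # re-computing min() and popping one step at a time.
--     # Return value only: unlike A, this does not mutate its arguments.
--     k = outer_ring.index(min(outer_ring))
--     outer_rot = outer_ring[k:] + outer_ring[:k]
--     j = k % len(inner_ring)
--     inner_rot = inner_ring[j:] + inner_ring[:j]
--     parts = []
--     for i in range(5):
--         parts.append(str(outer_rot[i]) + str(inner_rot[i]) + str(inner_rot[(i + 1) % 5]))
--     return "".join(parts)
-- ===== Notes on version B (the rewrite author's own statement) =====
-- stated objective: faster
-- what changed: Replaces the min-recomputing rotate-one-step-at-a-time while loop by computing the shift k = outer.index(min(outer)) once and rotating each ring with a single slice concatenation (k mod len for the inner ring), then joining the 5 line strings; B does not mutate its arguments (A does), the return value is identical.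
import Mathlib
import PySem

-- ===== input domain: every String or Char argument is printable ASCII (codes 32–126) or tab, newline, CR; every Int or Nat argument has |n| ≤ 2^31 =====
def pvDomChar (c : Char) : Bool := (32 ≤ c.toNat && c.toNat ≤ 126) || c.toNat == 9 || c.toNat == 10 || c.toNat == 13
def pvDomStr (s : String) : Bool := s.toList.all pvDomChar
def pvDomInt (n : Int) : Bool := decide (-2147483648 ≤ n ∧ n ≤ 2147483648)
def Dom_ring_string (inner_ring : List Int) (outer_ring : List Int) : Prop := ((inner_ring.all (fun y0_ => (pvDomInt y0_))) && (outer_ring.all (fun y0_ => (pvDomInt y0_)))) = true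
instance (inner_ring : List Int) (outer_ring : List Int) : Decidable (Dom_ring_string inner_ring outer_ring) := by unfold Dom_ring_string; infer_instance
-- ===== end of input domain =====

-- B replaces A's min-recomputing rotate-until-min while loop with one index-of-min
-- computation plus modular indexing; equivalence is about the RETURN value only
-- (A mutates its list arguments in place, B does not mutate them).

-- ===== PORT A =====
-- the 'while outer[0] != min(outer): rotate both' loop; fuel only makes the
-- recursion total — inside Pre_ the loop stops after at most len(outer)-1 rotations
def pvRingLoop : Nat → List Int → List Int → List Int × List Int
  | 0, inner, outer => (inner, outer)
  | fuel+1, inner, outer =>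
    if PySem.List.pyGetD outer 0 0 ≠ (PySem.List.min? outer (fun x => x)).getD 0 then
      match PySem.List.pop? outer 0, PySem.List.pop? inner 0 with
      | some (ov, orest), some (iv, irest) => pvRingLoop fuel (irest ++ [iv]) (orest ++ [ov])
      | _, _ => (inner, outer)
    else (inner, outer)

-- string concatenation is ported through PySem.Int.toChars / List Char (exact);
-- pyGetD's default is never read inside Pre_ (all indices are in range there)
def ring_string (inner_ring : List Int) (outer_ring : List Int) : String :=
  let p := pvRingLoop outer_ring.length inner_ring outer_ring
  let inner' := p.1
  let outer' := p.2
  String.mk ((PySem.List.pyRange 0 5 1).foldl (fun s i =>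
    s ++ PySem.Int.toChars (PySem.List.pyGetD outer' i 0)
      ++ PySem.Int.toChars (PySem.List.pyGetD inner' i 0)
      ++ PySem.Int.toChars (PySem.List.pyGetD inner' (PySem.Int.mod (i+1) 5) 0)) [])

-- ===== PORT B =====
-- slices are ported with PySem.List.slice (exact); 'k % len(inner)' is PySem.Int.mod
-- (Python raises ZeroDivisionError on an empty inner ring — outside Pre_)
def ring_string_alt (inner_ring : List Int) (outer_ring : List Int) : String :=
  let k : Int := ((PySem.List.index? outer_ring ((PySem.List.min? outer_ring (fun x => x)).getD 0)).getD 0 : Nat)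
  let outer_rot := PySem.List.slice outer_ring (some k) none ++ PySem.List.slice outer_ring none (some k)
  let j : Int := PySem.Int.mod k (inner_ring.length : Int)
  let inner_rot := PySem.List.slice inner_ring (some j) none ++ PySem.List.slice inner_ring none (some j)
  let parts := (PySem.List.pyRange 0 5 1).foldl (fun acc i =>
    acc ++ [PySem.Int.toChars (PySem.List.pyGetD outer_rot i 0)
          ++ PySem.Int.toChars (PySem.List.pyGetD inner_rot i 0)
          ++ PySem.Int.toChars (PySem.List.pyGetD inner_rot (PySem.Int.mod (i+1) 5) 0)]) []
  String.mk (PySem.Chars.join [] parts)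

-- ===== PRECONDITION & SPEC =====
-- exactly where A returns: both rings need at least 5 elements (the for loop reads
-- indices 0..4 of each; shorter input raises IndexError, empty outer ValueError/IndexError)
def Pre_ring_string (inner_ring : List Int) (outer_ring : List Int) : Prop :=
  5 ≤ inner_ring.length ∧ 5 ≤ outer_ring.length
instance (inner_ring : List Int) (outer_ring : List Int) : Decidable (Pre_ring_string inner_ring outer_ring) := by unfold Pre_ring_string; infer_instance
def pvWitness_ring_string : List Int × List Int := ([1, 2, 3, 4, 5], [6, 7, 8, 9, 10])

def Spec_ring_string (inner_ring : List Int) (outer_ring : List Int) (out : String) : Prop := out = ring_string_alt inner_ring outer_ring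
instance (inner_ring : List Int) (outer_ring : List Int) (out : String) : Decidable (Spec_ring_string inner_ring outer_ring out) := by unfold Spec_ring_string; infer_instance

-- ===== CLAIM (what is proved, stated in full; the proofs are below) =====
def Claim_equal_ring_string : Prop := ∀ (inner_ring : List Int) (outer_ring : List Int), Dom_ring_string inner_ring outer_ring → Pre_ring_string inner_ring outer_ring → Spec_ring_string inner_ring outer_ring (ring_string inner_ring outer_ring)

-- ===== LEMMAS AND PROOFS =====

-- k left-rotations (pop front, append) of a list
def pvRotN : Nat → List Int → List Int
  | 0, l => l
  | k+1, l => pvRotN k (l.tail ++ l.take 1)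

theorem pvModAux (a n : Nat) : (a % n + 1) % n = (a + 1) % n := by
  conv_lhs => rw [Nat.add_mod]
  conv_rhs => rw [Nat.add_mod]
  rw [Nat.mod_mod_of_dvd _ dvd_rfl]

-- k pop-and-append rotations are one drop/take rotation by k mod the length
theorem pvRotN_eq (k : Nat) : ∀ (l : List Int), l ≠ [] →
    pvRotN k l = l.drop (k % l.length) ++ l.take (k % l.length) := by
  induction k with
  | zero => intro l _; simp [pvRotN]
  | succ k ih =>
    intro l hl
    cases l with
    | nil => exact absurd rfl hl
    | cons x xs =>
      have h1 : pvRotN (k+1) (x :: xs) = pvRotN k (xs ++ [x]) := rfl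
      rw [h1, ih (xs ++ [x]) (by simp)]
      have hlen : (xs ++ [x]).length = xs.length + 1 := by simp
      rw [hlen]
      set n := xs.length + 1 with hn
      rw [show (x :: xs).length = n from by simp [hn]]
      have ht : k % n < n := Nat.mod_lt _ (by omega)
      set t := k % n with htdef
      have hsucc : (k + 1) % n = (t + 1) % n := by rw [htdef, pvModAux]
      by_cases hcase : t + 1 < n
      · have h2 : (k + 1) % n = t + 1 := by rw [hsucc, Nat.mod_eq_of_lt hcase]
        rw [h2]
        rw [List.drop_append_of_le_length (by omega), List.take_append_of_le_length (by omega)]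
        simp [List.append_assoc]
      · have ht1 : t = xs.length := by omega
        have h2 : (k + 1) % n = 0 := by rw [hsucc, ht1, hn]; simp
        rw [h2, ht1]
        simp

-- the minimum VALUE is determined by the membership/lower-bound characterisation
theorem pvMin_unique (l : List Int) (m : Int) (hm : m ∈ l) (hmin : ∀ y ∈ l, m ≤ y) :
    PySem.List.min? l (fun x => x) = some m := by
  obtain ⟨m', hm'⟩ : ∃ m', PySem.List.min? l (fun x => x) = some m' := by
    cases h : PySem.List.min? l (fun x => x) with
    | none => rw [PySem.List.min?_eq_none_iff] at h; subst h; simp at hm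
    | some m' => exact ⟨m', rfl⟩
  have h1 : m' ∈ l := PySem.List.min?_mem hm'
  have h2 : ∀ y ∈ l, m' ≤ y := PySem.List.min?_isMin hm'
  rw [hm']
  exact congrArg some (le_antisymm (hmin m' h1) (h2 m hm)).symm

theorem pvRingLoop_eq (k : Nat) : ∀ (fuel : Nat) (inner outer : List Int), inner ≠ [] →
    PySem.List.index? outer ((PySem.List.min? outer (fun x => x)).getD 0) = some k →
    k ≤ fuel →
    pvRingLoop fuel inner outer = (pvRotN k inner, pvRotN k outer) := by
  induction k with
  | zero =>
    intro fuel inner outer _ hidx _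
    set m := (PySem.List.min? outer (fun x => x)).getD 0 with hmdef
    obtain ⟨pre, suf, houter, hlen, _⟩ := (PySem.List.index?_eq_some_iff _ _ _).mp hidx
    have hpre : pre = [] := List.eq_nil_of_length_eq_zero hlen
    subst hpre
    simp only [List.nil_append] at houter
    have hguard : ¬ (PySem.List.pyGetD outer 0 0 ≠ m) := by
      rw [houter, PySem.List.pyGetD_zero_cons]
      exact not_ne_iff.mpr rfl
    cases fuel with
    | zero => rfl
    | succ f => rw [pvRingLoop, if_neg hguard]; rfl
  | succ k ih =>
    intro fuel inner outer hinner hidx hfuel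
    set m := (PySem.List.min? outer (fun x => x)).getD 0 with hmdef
    obtain ⟨pre, suf, houter, hlen, hnotin⟩ := (PySem.List.index?_eq_some_iff _ _ _).mp hidx
    cases fuel with
    | zero => omega
    | succ f =>
      cases pre with
      | nil => simp at hlen
      | cons x pre' =>
        cases inner with
        | nil => exact absurd rfl hinner
        | cons y ys =>
          have houter' : outer = x :: (pre' ++ m :: suf) := by simpa using houter
          have hxm : x ≠ m := fun h => hnotin (h ▸ List.mem_cons_self)
          -- the minimum value of the rotated outer ring is the same value m
          have hmv : PySem.List.min? outer (fun x => x) = some m := by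
            cases h : PySem.List.min? outer (fun x => x) with
            | none =>
              rw [PySem.List.min?_eq_none_iff] at h
              rw [h] at houter'; exact absurd houter' (by simp)
            | some m' => rw [hmdef, h]; rfl
          have hmmem : m ∈ outer := by rw [houter']; simp
          have hmmin : ∀ y ∈ outer, m ≤ y := PySem.List.min?_isMin hmv
          have hrotmin : PySem.List.min? ((pre' ++ m :: suf) ++ [x]) (fun x => x) = some m := by
            apply pvMin_unique
            · simp
            · intro y hy
              apply hmmin
              rw [houter']
              rcases List.mem_append.mp hy with h | h
              · exact List.mem_cons_of_mem _ (by simpa using h)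
              · simp at h; simp [h]
          -- first index of m in the rotated outer ring is k
          have hidx_tail : PySem.List.index? (pre' ++ m :: suf) m = some k := by
            rw [houter', PySem.List.index?_cons_of_ne _ hxm] at hidx
            cases h : PySem.List.index? (pre' ++ m :: suf) m with
            | none => rw [h] at hidx; simp at hidx
            | some j => rw [h] at hidx; simp at hidx; exact congrArg some (by omega)
          have hidx_rot : PySem.List.index? ((pre' ++ m :: suf) ++ [x]) m = some k := by
            rw [PySem.List.index?_append_of_mem _ (show m ∈ pre' ++ m :: suf by simp), hidx_tail]
          -- one loop step: guard true, pop both fronts, recurse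
          rw [pvRingLoop]
          rw [houter']
          rw [if_pos (by rw [PySem.List.pyGetD_zero_cons, ← houter', ← hmdef]; exact hxm)]
          rw [PySem.List.pop?_zero_cons, PySem.List.pop?_zero_cons]
          have hrec := ih f (ys ++ [y]) ((pre' ++ m :: suf) ++ [x]) (by simp)
            (by rw [hrotmin]; simpa using hidx_rot) (by omega)
          show pvRingLoop f (ys ++ [y]) ((pre' ++ m :: suf) ++ [x]) =
            (pvRotN (k + 1) (y :: ys), pvRotN (k + 1) (x :: (pre' ++ m :: suf)))
          rw [hrec]
          rfl

-- ===== VERDICT (by name: the statement is the Claim_ definition above) =====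
theorem ring_string_spec : Claim_equal_ring_string := by
  intro inner outer _ hpre
  obtain ⟨hin, hout⟩ := hpre
  have hinil : inner ≠ [] := by intro h; rw [h] at hin; simp at hin
  have honil : outer ≠ [] := by intro h; rw [h] at hout; simp at hout
  unfold Spec_ring_string ring_string ring_string_alt
  obtain ⟨m, hm⟩ : ∃ m, PySem.List.min? outer (fun x => x) = some m := by
    cases h : PySem.List.min? outer (fun x => x) with
    | none => rw [PySem.List.min?_eq_none_iff] at h; exact absurd h honil
    | some m => exact ⟨m, rfl⟩
  obtain ⟨kn, hkn⟩ : ∃ kn, PySem.List.index? outer ((PySem.List.min? outer (fun x => x)).getD 0) = some kn := by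
    rw [hm]
    have : m ∈ outer := PySem.List.min?_mem hm
    exact Option.isSome_iff_exists.mp ((PySem.List.index?_isSome_iff _ _).mpr this)
  obtain ⟨hklt, -, -⟩ := PySem.List.getElem_of_index?_eq_some hkn
  rw [pvRingLoop_eq kn outer.length inner outer hinil hkn (by omega)]
  rw [hkn]
  simp only [Option.getD_some]
  rw [pvRotN_eq kn outer honil, pvRotN_eq kn inner hinil]
  rw [Nat.mod_eq_of_lt hklt]
  rw [PySem.Int.mod_natCast]
  rw [PySem.List.slice_from_natCast, PySem.List.slice_to_natCast,
      PySem.List.slice_from_natCast, PySem.List.slice_to_natCast]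
  rw [show PySem.List.pyRange 0 5 1 = [0, 1, 2, 3, 4] by decide]
  simp [PySem.Chars.join, List.intercalate, List.intersperse, List.append_assoc]
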